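-- pv_equiv track=rewrite | github.com/yiyan023/Data-Structures | Formation/Match Fellows By Skill Level.py | canMatchFellows
-- ===== SOURCE A (Python) =====
-- from collections import defaultdict
--
-- def canMatchFellows(skillMap: dict) -> bool:
--     # store the number of odd frequencies
--     odd = 0
--     freq = defaultdict(int)
--
--     for level in skillMap.values():
--         freq[level] += 1
--
--         if freq[level] % 2:
--             odd += 1
--
--         else:
--             odd -= 1
--
--     return not odd
-- ===== SOURCE B (Python) =====
-- def canMatchFellows(skillMap: dict) -> bool:
--     # Sort the levels, then check they pair up adjacently (each equal to its neighbour).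
--     vs = sorted(skillMap.values())
--     i = 0
--     while i + 1 < len(vs):
--         if vs[i] != vs[i + 1]:
--             return False
--         i += 2
--     return i == len(vs)
-- ===== Notes on version B (the rewrite author's own statement) =====
-- stated objective: alternative
-- what changed: Replaces the single-pass frequency-parity tally with a sort-then-scan: sort the values, then check the sorted list splits into adjacent equal pairs (every level has even frequency iff its occurrences, which are contiguous after sorting, pair up).
import Mathlib
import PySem

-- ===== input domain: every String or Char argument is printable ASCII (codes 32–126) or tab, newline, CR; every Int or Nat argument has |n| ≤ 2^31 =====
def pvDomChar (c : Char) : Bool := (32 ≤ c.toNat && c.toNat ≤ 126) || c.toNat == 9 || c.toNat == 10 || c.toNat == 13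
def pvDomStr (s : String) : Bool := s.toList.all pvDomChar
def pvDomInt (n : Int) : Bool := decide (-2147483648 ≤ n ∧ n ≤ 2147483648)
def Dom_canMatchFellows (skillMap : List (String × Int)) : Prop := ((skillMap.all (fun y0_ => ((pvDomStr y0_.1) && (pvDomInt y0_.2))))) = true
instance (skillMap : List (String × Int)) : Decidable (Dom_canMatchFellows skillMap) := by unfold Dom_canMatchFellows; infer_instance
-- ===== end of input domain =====

-- B replaces A's single-pass frequency-parity tally with sort-then-scan: sort the values,
-- then check the sorted list splits into adjacent equal pairs (alternative; same task, O(n log n)).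

-- ===== PORT A =====
-- loop body: freq[level] += 1; if freq[level] % 2: odd += 1 else: odd -= 1
def pvStepA (st : Int × PySem.Dict Int Int) (level : Int) : Int × PySem.Dict Int Int :=
  let freq := st.2.insert level (st.2.getD level 0 + 1)
  if PySem.Int.mod (freq.getD level 0) 2 ≠ 0 then (st.1 + 1, freq) else (st.1 - 1, freq)

def canMatchFellows (skillMap : List (String × Int)) : Bool :=
  let st := ((PySem.Dict.ofList skillMap).values).foldl pvStepA (0, PySem.Dict.empty)
  st.1 == 0      -- return not odd

-- ===== PORT B =====
-- the while loop 'while i + 1 < len(vs): if vs[i] != vs[i+1]: return False; i += 2; return i == len(vs)'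
-- written as the equivalent two-at-a-time structural recursion over the sorted list
def pvPaired : List Int → Bool
  | [] => true            -- i == len(vs)
  | [_] => false          -- one element left: i == len(vs) - 1
  | a :: b :: t => if a != b then false else pvPaired t

def canMatchFellows_alt (skillMap : List (String × Int)) : Bool :=
  pvPaired (PySem.List.sorted ((PySem.Dict.ofList skillMap).values) (fun x => x) false)

-- ===== PRECONDITION & SPEC =====
def Spec_canMatchFellows (skillMap : List (String × Int)) (out : Bool) : Prop := out = canMatchFellows_alt skillMap
instance (skillMap : List (String × Int)) (out : Bool) : Decidable (Spec_canMatchFellows skillMap out) := by unfold Spec_canMatchFellows; infer_instance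

-- ===== CLAIM (what is proved, stated in full; the proofs are below) =====
def Claim_equal_canMatchFellows : Prop := ∀ (skillMap : List (String × Int)), Dom_canMatchFellows skillMap → Spec_canMatchFellows skillMap (canMatchFellows skillMap)

-- ===== LEMMAS AND PROOFS =====

-- proof device: the set of values seen an odd number of times so far, toggled per value
def pvToggle (s : PySem.Set Int) (level : Int) : PySem.Set Int :=
  if s.contains level then PySem.Set.discard s level else PySem.Set.add s level

-- removing a present element of a duplicate-free set shrinks it by one
theorem pv_length_discard {s : PySem.Set Int} {v : Int} (hnd : s.Nodup) (hv : v ∈ s) :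
    (PySem.Set.discard s v).length + 1 = s.length := by
  induction s with
  | nil => cases hv
  | cons a t ih =>
    rcases List.nodup_cons.mp hnd with ⟨ha, hnt⟩
    by_cases hav : a = v
    · subst hav
      have hdt : PySem.Set.discard (a :: t) a = t := by
        have hall : ∀ y ∈ t, (!(y == a)) = true := by
          intro y hy
          simp only [Bool.not_eq_eq_eq_not, Bool.not_true, beq_eq_false_iff_ne, ne_eq]
          intro h; subst h; exact ha hy
        simp [PySem.Set.discard, List.filter_eq_self.mpr hall]
      simp [hdt]
    · have hvt : v ∈ t := by cases hv with | head => exact absurd rfl hav | tail _ h => exact h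
      have hdt : PySem.Set.discard (a :: t) v = a :: PySem.Set.discard t v := by
        simp [PySem.Set.discard, hav]
      rw [hdt]
      simp only [List.length_cons]
      have := ih hnt hvt
      omega

-- loop invariant: A's odd tally is the size of the toggle set, with matching parities
theorem pv_loop (vs : List Int) (odd : Int) (freq : PySem.Dict Int Int) (s : PySem.Set Int)
    (hnd : s.Nodup)
    (hmem : ∀ x, x ∈ s ↔ PySem.Int.mod (freq.getD x 0) 2 = 1)
    (hlen : odd = (s.length : Int)) :
    (vs.foldl pvStepA (odd, freq)).1 = ((vs.foldl pvToggle s).length : Int) := by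
  induction vs generalizing odd freq s with
  | nil => simpa using hlen
  | cons v vs ih =>
    have hc : PySem.Int.mod (freq.getD v 0) 2 = (freq.getD v 0) % 2 :=
      PySem.Int.mod_eq_emod_of_pos (by norm_num)
    have hgv : ((freq.insert v (freq.getD v 0 + 1)).getD v 0) = freq.getD v 0 + 1 :=
      PySem.Dict.getD_insert_self freq v _ 0
    have hmem' : ∀ x, x ≠ v → ((freq.insert v (freq.getD v 0 + 1)).getD x 0) = freq.getD x 0 := by
      intro x hx
      rw [PySem.Dict.getD_insert]
      simp [hx]
    by_cases hpar : PySem.Int.mod (freq.getD v 0) 2 = 1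
    · -- v currently has odd count: A decrements, the toggle set discards
      have hvs : v ∈ s := (hmem v).mpr hpar
      have hA : pvStepA (odd, freq) v = (odd - 1, freq.insert v (freq.getD v 0 + 1)) := by
        simp only [pvStepA, hgv]
        rw [if_neg]
        simp only [ne_eq, not_not, PySem.Int.mod_eq_emod_of_pos (by norm_num : (0:Int) < 2)]
        rw [hc] at hpar; omega
      have hB : pvToggle s v = PySem.Set.discard s v := by
        simp [pvToggle, hvs]
      simp only [List.foldl_cons, hA, hB]
      refine ih (odd - 1) _ _ (PySem.Set.nodup_discard s v hnd) ?_ ?_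
      · intro x
        rw [PySem.Set.mem_discard]
        by_cases hx : x = v
        · subst hx
          rw [hgv]
          constructor
          · rintro ⟨_, h⟩; exact absurd rfl h
          · intro h
            rw [PySem.Int.mod_eq_emod_of_pos (by norm_num : (0:Int) < 2)] at h
            rw [hc] at hpar; omega
        · rw [hmem' x hx, ← hmem x]
          simp [hx]
      · have := pv_length_discard hnd hvs
        omega
    · -- v currently has even count: A increments, the toggle set adds
      have hvs : v ∉ s := fun h => hpar ((hmem v).mp h)
      have hA : pvStepA (odd, freq) v = (odd + 1, freq.insert v (freq.getD v 0 + 1)) := by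
        simp only [pvStepA, hgv]
        rw [if_pos]
        simp only [ne_eq, PySem.Int.mod_eq_emod_of_pos (by norm_num : (0:Int) < 2)]
        rw [hc] at hpar; omega
      have hB : pvToggle s v = s ++ [v] := by
        simp [pvToggle, PySem.Set.add, hvs]
      simp only [List.foldl_cons, hA, hB]
      refine ih (odd + 1) _ _ ?_ ?_ ?_
      · simp only [List.nodup_append, List.nodup_singleton, true_and]
        refine ⟨hnd, ?_⟩
        intro a has b hb
        simp only [List.mem_singleton] at hb
        subst hb
        exact fun h => hvs (h ▸ has)
      · intro x
        simp only [List.mem_append, List.mem_singleton]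
        by_cases hx : x = v
        · subst hx
          rw [hgv]
          constructor
          · intro _
            rw [PySem.Int.mod_eq_emod_of_pos (by norm_num : (0:Int) < 2)]
            rw [hc] at hpar
            have := Int.emod_two_eq (freq.getD x 0)
            omega
          · intro _; right; rfl
        · rw [hmem' x hx, ← hmem x]
          simp [hx]
      · simp [hlen]

-- membership in the final toggle set encodes count parity
theorem pv_mem_toggle (vs : List Int) (s : PySem.Set Int) (hnd : s.Nodup) (x : Int) :
    x ∈ vs.foldl pvToggle s ↔ (x ∈ s ↔ vs.count x % 2 = 0) := by
  induction vs generalizing s with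
  | nil => simp
  | cons v vs ih =>
    by_cases hvs : v ∈ s
    · have hB : pvToggle s v = PySem.Set.discard s v := by simp [pvToggle, hvs]
      simp only [List.foldl_cons, hB]
      rw [ih _ (PySem.Set.nodup_discard s v hnd)]
      rw [PySem.Set.mem_discard]
      by_cases hx : x = v
      · subst hx
        simp only [hvs, List.count_cons_self, true_iff, ne_eq, not_true_eq_false, and_false,
          false_iff]
        omega
      · simp only [hx, ne_eq, not_false_eq_true, and_true, List.count_cons, beq_iff_eq]
        have : ¬ v = x := fun h => hx h.symm
        simp [this]
    · have hB : pvToggle s v = s ++ [v] := by simp [pvToggle, PySem.Set.add, hvs]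
      have hnd' : (s ++ [v]).Nodup := by
        simp only [List.nodup_append, List.nodup_singleton, true_and]
        exact ⟨hnd, fun a has b hb => by
          simp only [List.mem_singleton] at hb; subst hb; exact fun h => hvs (h ▸ has)⟩
      simp only [List.foldl_cons, hB]
      rw [ih _ hnd']
      simp only [List.mem_append, List.mem_singleton]
      by_cases hx : x = v
      · subst hx
        simp only [hvs, List.count_cons_self, or_true, true_iff, false_iff]
        omega
      · simp only [hx, or_false, List.count_cons, beq_iff_eq]
        have : ¬ v = x := fun h => hx h.symm
        simp [this]

-- on a nondecreasing list, pvPaired succeeds iff every value occurs an even number of times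
theorem pv_paired_iff (l : List Int) (h : l.Pairwise (· ≤ ·)) :
    pvPaired l = true ↔ ∀ x, l.count x % 2 = 0 := by
  induction l using pvPaired.induct with
  | case1 => simp [pvPaired]
  | case2 a =>
    simp only [pvPaired, Bool.false_eq_true, false_iff, not_forall]
    refine ⟨a, ?_⟩
    simp
  | case3 a b t hbne =>
    -- a != b: pvPaired is false, and a occurs exactly once
    rcases List.pairwise_cons.mp h with ⟨hab, h2⟩
    rcases List.pairwise_cons.mp h2 with ⟨hbt, _⟩
    have heq : ¬ a = b := by simpa using hbne
    simp only [pvPaired, hbne, if_true, Bool.false_eq_true, false_iff, not_forall]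
    refine ⟨a, ?_⟩
    have hlt : a < b := lt_of_le_of_ne (hab b (by simp)) heq
    have hat : a ∉ t := fun hmem => absurd (hbt a hmem) (not_le.mpr hlt)
    have hct : t.count a = 0 := List.count_eq_zero.mpr hat
    have hcb : ¬ b = a := fun hc => heq hc.symm
    simp only [List.count_cons, hct, hcb, if_false, beq_iff_eq, if_true, zero_add]
    omega
  | case4 a b t hbne ih =>
    have heq : a = b := by simpa using hbne
    subst heq
    rcases List.pairwise_cons.mp h with ⟨_, h2⟩
    rcases List.pairwise_cons.mp h2 with ⟨_, ht⟩
    simp only [pvPaired, bne_self_eq_false, Bool.false_eq_true, if_false]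
    rw [ih ht]
    constructor
    · intro hall x
      have := hall x
      by_cases hx : x = a
      · subst hx; simp only [List.count_cons_self]; omega
      · have hne : ¬ a = x := fun hc => hx hc.symm
        simp [hne, hall x]
    · intro hall x
      have := hall x
      by_cases hx : x = a
      · subst hx; simp only [List.count_cons_self] at this; omega
      · have hne : ¬ a = x := fun hc => hx hc.symm
        simpa [List.count_cons, hne] using this

-- ===== VERDICT (by name: the statement is the Claim_ definition above) =====
theorem canMatchFellows_spec : Claim_equal_canMatchFellows := by
  intro skillMap _
  unfold Spec_canMatchFellows canMatchFellows canMatchFellows_alt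
  set vs := (PySem.Dict.ofList skillMap).values with hvs
  have hA := pv_loop vs 0 PySem.Dict.empty PySem.Set.empty
    List.nodup_nil (by intro x; simp [PySem.Set.empty, PySem.Dict.getD_empty, PySem.Int.mod]) rfl
  simp only []
  rw [hA]
  have hsorted := PySem.List.sorted_pairwise (xs := vs) (key := fun x => x)
  have hperm : (PySem.List.sorted vs (fun x => x) false).Perm vs := PySem.List.sorted_perm vs _ _
  have hiffB : pvPaired (PySem.List.sorted vs (fun x => x) false) = true ↔ ∀ x, vs.count x % 2 = 0 := by
    rw [pv_paired_iff _ hsorted]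
    constructor <;> intro hall x <;> have := hall x <;>
      rwa [hperm.count_eq] at * 
  have hiffA : (((vs.foldl pvToggle PySem.Set.empty).length : Int) == 0) = true ↔ ∀ x, vs.count x % 2 = 0 := by
    simp only [beq_iff_eq, Int.natCast_eq_zero, List.length_eq_zero_iff]
    rw [List.eq_nil_iff_forall_not_mem]
    constructor
    · intro hnil x
      have := pv_mem_toggle vs PySem.Set.empty List.nodup_nil x
      have hx := hnil x
      rw [this] at hx
      by_contra hodd
      exact hx (by simp [PySem.Set.empty]; omega)
    · intro hall x
      rw [pv_mem_toggle vs PySem.Set.empty List.nodup_nil x]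
      simp [PySem.Set.empty, hall x]
  rw [Bool.eq_iff_iff, hiffA, hiffB]
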